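-- pv_equiv track=rewrite | github.com/itpp-labs/odoo-devops-docs | tools/merge-bot/scripts/merge.py | solve_version
-- ===== SOURCE A (Python) =====
-- def parse_version(line):
--     return line.split('"')[-2]
--
-- def solve_version(old_version, new_version):
--     parsed_old = parse_version(old_version).split('.')
--     parsed_new = parse_version(new_version).split('.')
--     odoo_version = parsed_new[0] + '.' + parsed_new[1]
--
--     module_version = ''
--     for i in range(2, len(parsed_new)):
--         if parsed_new[i] > parsed_old[i]:
--             for j in range(i, len(parsed_new)):
--                 module_version += '.' + parsed_new[j]
--             break
--         elif parsed_new[i] < parsed_old[i]: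
--             for j in range(i, len(parsed_new)):
--                 module_version += '.' + parsed_old[j]
--             break
--         else:
--             module_version += '.' + parsed_new[i]
--
--     version = odoo_version + module_version
--
--     version_line = new_version.replace(parse_version(new_version), version)
--
--     return version_line
-- ===== SOURCE B (Python) =====
-- def parse_version(line):
--     return line.split('"')[-2]
--
-- def solve_version(old_version, new_version):
--     new_mod = parse_version(new_version)
--     new = new_mod.split('.')
--     old = parse_version(old_version).split('.')
--     # the winning module tail is just the lexicographically larger tail (Python's
--     # built-in list comparison), truncated to new's number of components
--     tail = max(old[2:], new[2:])[:len(new) - 2]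
--     version = '.'.join(new[:2] + tail)
--     return new_version.replace(new_mod, version)
-- ===== Notes on version B (the rewrite author's own statement) =====
-- stated objective: simpler
-- what changed: A interleaves comparison and output-building in a loop that accumulates equal components one by one and runs a nested copy loop over the winning tail at the first divergence; B has no comparison loop at all: it takes the lexicographically larger of the two sliced tails with Python's built-in list max, truncates it to new's length, and joins once.
import Mathlib
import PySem

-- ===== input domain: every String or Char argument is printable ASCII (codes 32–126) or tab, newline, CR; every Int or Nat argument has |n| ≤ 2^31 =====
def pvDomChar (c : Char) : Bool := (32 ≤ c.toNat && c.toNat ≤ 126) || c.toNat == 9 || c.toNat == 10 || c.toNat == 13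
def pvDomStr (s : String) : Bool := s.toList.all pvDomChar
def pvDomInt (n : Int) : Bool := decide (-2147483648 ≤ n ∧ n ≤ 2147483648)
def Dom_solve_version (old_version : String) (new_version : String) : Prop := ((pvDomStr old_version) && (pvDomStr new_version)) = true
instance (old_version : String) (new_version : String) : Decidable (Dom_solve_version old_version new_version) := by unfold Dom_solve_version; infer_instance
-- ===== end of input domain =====

-- B drops A's comparison loop with its nested copy loops entirely: the module tail is the
-- lexicographically larger of the two sliced tails (Python's built-in list max), truncated
-- to new's length and joined once (objective: simpler).

-- ===== PORT A =====
-- parse_version(line) = line.split('"')[-2]; Python raises IndexError when line contains no '"'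
-- (excluded by Pre_); the .getD "" only totalises that excluded case.
def pv_parse (line : String) : String :=
  (PySem.List.pyGet? ((PySem.Str.split? line "\"").getD []) (-2)).getD ""

-- s.split('.'); the separator is non-empty so split? is always `some` (getD [] never fires).
def pvSplitDots (s : String) : List String := (PySem.Str.split? s ".").getD []

-- for j in range(i, n): module_version += '.' + src[j]   (src[j] in range under Pre_; getD totalises)
def svInner (src : List String) (i n : Nat) (acc : String) : String :=
  (PySem.List.pyRange (i : Int) (n : Int) 1).foldl
    (fun a j => a ++ ("." ++ PySem.List.pyGetD src j "")) acc

-- A's outer loop from index i with `break` as recursion; parsed_old[i] raises in Python when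
-- out of range (excluded by Pre_; getD totalises).
def svLoop (pold pnew : List String) (i : Nat) (acc : String) : String :=
  if _h : i < pnew.length then
    if pold.getD i "" < pnew.getD i "" then
      svInner pnew i pnew.length acc
    else if pnew.getD i "" < pold.getD i "" then
      svInner pold i pnew.length acc
    else
      svLoop pold pnew (i + 1) (acc ++ ("." ++ pnew.getD i ""))
  else acc
termination_by pnew.length - i

def solve_version (old_version : String) (new_version : String) : String :=
  let parsed_old := pvSplitDots (pv_parse old_version)
  let parsed_new := pvSplitDots (pv_parse new_version)
  let odoo_version := parsed_new.getD 0 "" ++ "." ++ parsed_new.getD 1 ""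
  let module_version := svLoop parsed_old parsed_new 2 ""
  let version := odoo_version ++ module_version
  PySem.Str.replace new_version (pv_parse new_version) version

-- ===== PORT B =====
-- Python's built-in `<` on lists of strings (lexicographic), hand-ported exactly.
def pyListLT : List String → List String → Bool
  | [], [] => false
  | [], _ :: _ => true
  | _ :: _, [] => false
  | a :: as, b :: bs => if a < b then true else if b < a then false else pyListLT as bs

-- Python's max(x, y): returns the first argument unless the second is strictly larger.
def pyListMax (x y : List String) : List String := if pyListLT x y then y else x

def solve_version_alt (old_version : String) (new_version : String) : String :=
  let new_mod := pv_parse new_version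
  let new := pvSplitDots new_mod
  let old := pvSplitDots (pv_parse old_version)
  let tail := PySem.List.slice
      (pyListMax (PySem.List.slice old (some 2) none) (PySem.List.slice new (some 2) none))
      none (some ((new.length : Int) - 2))
  let version := PySem.Str.join "." (PySem.List.slice new none (some 2) ++ tail)
  PySem.Str.replace new_version new_mod version

-- ===== PRECONDITION & SPEC =====
-- Pre_ excludes exactly the inputs where the Python A raises IndexError: a version string without
-- '"' (parse_version), fewer than two dot-components in the new version (parsed_new[1]), and the
-- case where parsed_old runs out before parsed_new while A still indexes into it (all components
-- equal up to old's end, or the first divergence makes old win, with old shorter than new).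
def Pre_solve_version (old_version : String) (new_version : String) : Prop :=
  PySem.Str.isIn "\"" old_version = true ∧ PySem.Str.isIn "\"" new_version = true ∧
  2 ≤ (pvSplitDots (pv_parse new_version)).length ∧
  ((pvSplitDots (pv_parse new_version)).length = 2 ∨
   (pvSplitDots (pv_parse new_version)).length ≤ (pvSplitDots (pv_parse old_version)).length ∨
   (∃ k < (pvSplitDots (pv_parse old_version)).length, 2 ≤ k ∧
      (∀ j < k, 2 ≤ j →
        (pvSplitDots (pv_parse new_version)).getD j "" =
          (pvSplitDots (pv_parse old_version)).getD j "") ∧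
      (pvSplitDots (pv_parse old_version)).getD k "" <
        (pvSplitDots (pv_parse new_version)).getD k ""))
instance (old_version : String) (new_version : String) : Decidable (Pre_solve_version old_version new_version) := by
  unfold Pre_solve_version; infer_instance

def pvWitness_solve_version : String × String :=
  ("    'version': \"12.0.1.0.2\",", "    'version': \"12.0.1.1.0\",")

def Spec_solve_version (old_version : String) (new_version : String) (out : String) : Prop := out = solve_version_alt old_version new_version
instance (old_version : String) (new_version : String) (out : String) : Decidable (Spec_solve_version old_version new_version out) := by unfold Spec_solve_version; infer_instance

-- ===== CLAIM (what is proved, stated in full; the proofs are below) =====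
def Claim_equal_solve_version : Prop := ∀ (old_version : String) (new_version : String), Dom_solve_version old_version new_version → Pre_solve_version old_version new_version → Spec_solve_version old_version new_version (solve_version old_version new_version)

-- ===== LEMMAS AND PROOFS =====

-- proof-side: the string ".c1.c2…" built from a list of components
def joinDots : List String → String
  | [] => ""
  | c :: rest => "." ++ c ++ joinDots rest

theorem toList_joinDots (l : List String) :
    (joinDots l).toList = l.flatMap (fun c => '.' :: c.toList) := by
  induction l with
  | nil => simp [joinDots]
  | cons c rest ih =>
    have hdot : (".":String).toList = ['.'] := by decide
    simp [joinDots, String.toList_append, hdot, ih]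

theorem chars_join_cons (b : List Char) (l : List (List Char)) :
    PySem.Chars.join ['.'] (b :: l) = b ++ l.flatMap (fun c => '.' :: c) := by
  induction l generalizing b with
  | nil => simp [PySem.Chars.join_singleton]
  | cons c rest ih =>
    rw [PySem.Chars.join_cons_cons, ih]
    simp

theorem str_join_cons (b : String) (rest : List String) :
    PySem.Str.join "." (b :: rest) = b ++ joinDots rest := by
  rw [String.ext_iff, PySem.Str.toList_join, String.toList_append, toList_joinDots]
  have hdot : (".":String).toList = ['.'] := by decide
  rw [hdot, List.map_cons, chars_join_cons]
  simp [List.flatMap_map]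

theorem drop_take_cons {α : Type} (w : List α) (d : α) (i n : Nat) (h1 : i < n) (h2 : i < w.length) :
    (w.drop i).take (n - i) = w.getD i d :: (w.drop (i + 1)).take (n - (i + 1)) := by
  rw [List.getD_eq_getElem w d h2, List.drop_eq_getElem_cons h2,
      show n - i = (n - (i + 1)) + 1 by omega, List.take_succ_cons]

theorem svInner_eq (src : List String) (i n : Nat) (acc : String) (hn : n ≤ src.length) :
    svInner src i n acc = acc ++ joinDots ((src.drop i).take (n - i)) := by
  obtain ⟨fuel, hfuel⟩ : ∃ f, n - i = f := ⟨_, rfl⟩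
  induction fuel generalizing i acc with
  | zero =>
    have hin : (n : Int) ≤ (i : Int) := by exact_mod_cast (by omega : n ≤ i)
    unfold svInner
    rw [show PySem.List.pyRange (i : Int) (n : Int) 1 = [] from by simp [pysem, hin]]
    rw [show n - i = 0 from by omega]
    simp [joinDots, String.append_empty]
  | succ f ih =>
    have hin : i < n := by omega
    unfold svInner
    rw [PySem.List.pyRange_one_cons (by exact_mod_cast hin)]
    simp only [List.foldl_cons]
    rw [show ((i : Int) + 1) = ((i + 1 : Nat) : Int) from by push_cast; ring]
    have hrec := ih (i + 1) (acc ++ ("." ++ PySem.List.pyGetD src (i : Int) "")) (by omega)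
    unfold svInner at hrec
    rw [hrec, PySem.List.pyGetD_natCast,
        drop_take_cons src "" i n hin (by omega), joinDots]
    simp [String.append_assoc]

theorem pyListLT_cons (a b : String) (as bs : List String) :
    pyListLT (a :: as) (b :: bs) = if a < b then true else if b < a then false else pyListLT as bs := rfl

theorem take_two (pnew : List String) (h2 : 2 ≤ pnew.length) :
    pnew.take 2 = [pnew.getD 0 "", pnew.getD 1 ""] := by
  cases pnew with
  | nil => simp at h2
  | cons a t =>
    cases t with
    | nil => simp at h2
    | cons b u => rfl

-- B's decision matches A's loop: from index i, with old long enough (or new destined to win),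
-- A's interleaved loop produces exactly the truncated lexicographic max of the two dropped tails.
theorem svLoop_eq_max (pold pnew : List String) (i : Nat) (acc : String)
    (hi : i ≤ pnew.length)
    (hcond : pnew.length ≤ pold.length ∨ pnew.length ≤ i ∨
      ∃ k, i ≤ k ∧ k < pold.length ∧ k < pnew.length ∧
        (∀ j, i ≤ j → j < k → pnew.getD j "" = pold.getD j "") ∧
        pold.getD k "" < pnew.getD k "") :
    svLoop pold pnew i acc =
      acc ++ joinDots ((pyListMax (pold.drop i) (pnew.drop i)).take (pnew.length - i)) := by
  obtain ⟨fuel, hfuel⟩ : ∃ f, pnew.length - i = f := ⟨_, rfl⟩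
  induction fuel generalizing i acc with
  | zero =>
    have hin : ¬ i < pnew.length := by omega
    rw [svLoop, dif_neg hin, show pnew.length - i = 0 from by omega]
    simp [joinDots, String.append_empty]
  | succ f ih =>
    have hin : i < pnew.length := by omega
    have hiold : i < pold.length := by
      rcases hcond with h | h | ⟨k, hk1, hk2, _, _, _⟩ <;> omega
    have holddrop : pold.drop i = pold.getD i "" :: pold.drop (i + 1) := by
      rw [List.getD_eq_getElem pold "" hiold, List.drop_eq_getElem_cons hiold]
    have hnewdrop : pnew.drop i = pnew.getD i "" :: pnew.drop (i + 1) := by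
      rw [List.getD_eq_getElem pnew "" hin, List.drop_eq_getElem_cons hin]
    rw [svLoop, dif_pos hin]
    by_cases hlt : pold.getD i "" < pnew.getD i ""
    · rw [if_pos hlt, svInner_eq pnew i pnew.length acc (le_refl _)]
      have hLT : pyListLT (pold.drop i) (pnew.drop i) = true := by
        rw [holddrop, hnewdrop, pyListLT_cons, if_pos hlt]
      rw [show pyListMax (pold.drop i) (pnew.drop i) = pnew.drop i from by
        unfold pyListMax; rw [hLT]; rfl]
    · rw [if_neg hlt]
      by_cases hgt : pnew.getD i "" < pold.getD i ""
      · -- old wins here: hcond's ∃ branch is impossible, so pnew.length ≤ pold.length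
        have hlen : pnew.length ≤ pold.length := by
          rcases hcond with h | h | ⟨k, hk1, hk2, hk3, hall, hklt⟩
          · exact h
          · omega
          · rcases Nat.eq_or_lt_of_le hk1 with h | h
            · subst h; exact absurd hklt hlt
            · have := hall i (le_refl i) h
              rw [this] at hgt
              exact absurd hgt (lt_irrefl _)
        rw [if_pos hgt, svInner_eq pold i pnew.length acc hlen]
        have hLT : pyListLT (pold.drop i) (pnew.drop i) = false := by
          rw [holddrop, hnewdrop, pyListLT_cons, if_neg hlt, if_pos hgt]
        rw [show pyListMax (pold.drop i) (pnew.drop i) = pold.drop i from by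
          unfold pyListMax; rw [hLT]; rfl]
      · -- equal components: peel one head off both sides and recurse
        rw [if_neg hgt]
        have heq : pnew.getD i "" = pold.getD i "" := le_antisymm (not_lt.mp hlt) (not_lt.mp hgt)
        have hcond' : pnew.length ≤ pold.length ∨ pnew.length ≤ i + 1 ∨
            ∃ k, i + 1 ≤ k ∧ k < pold.length ∧ k < pnew.length ∧
              (∀ j, i + 1 ≤ j → j < k → pnew.getD j "" = pold.getD j "") ∧
              pold.getD k "" < pnew.getD k "" := by
          rcases hcond with h | h | ⟨k, hk1, hk2, hk3, hall, hklt⟩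
          · exact Or.inl h
          · omega
          · right; right
            refine ⟨k, ?_, hk2, hk3, fun j hj1 hj2 => hall j (by omega) hj2, hklt⟩
            rcases Nat.eq_or_lt_of_le hk1 with h | h
            · subst h; exact absurd hklt hlt
            · omega
        have hff : pnew.length - (i + 1) = f := by clear hcond hcond'; omega
        have hii : i + 1 ≤ pnew.length := by clear hcond hcond'; omega
        have hrec := ih (i + 1) (acc ++ ("." ++ pnew.getD i "")) hii hcond' hff
        rw [hrec]
        have hmax : pyListMax (pold.drop i) (pnew.drop i)
            = pold.getD i "" :: pyListMax (pold.drop (i + 1)) (pnew.drop (i + 1)) := by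
          have hLT : pyListLT (pold.drop i) (pnew.drop i)
              = pyListLT (pold.drop (i + 1)) (pnew.drop (i + 1)) := by
            rw [holddrop, hnewdrop, pyListLT_cons, if_neg hlt, if_neg hgt]
          unfold pyListMax
          rw [hLT]
          by_cases h : pyListLT (pold.drop (i + 1)) (pnew.drop (i + 1)) = true
          · rw [if_pos h, if_pos h, hnewdrop, heq]
          · rw [if_neg h, if_neg h, holddrop]
        have hsub : pnew.length - i = (pnew.length - (i + 1)) + 1 := by clear hcond hcond'; omega
        rw [hmax, hsub,
            List.take_succ_cons, joinDots, heq]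
        simp [String.append_assoc]

theorem versions_eq (pold pnew : List String) (h2 : 2 ≤ pnew.length) :
    (pnew.getD 0 "" ++ "." ++ pnew.getD 1 "") ++
        joinDots ((pyListMax (pold.drop 2) (pnew.drop 2)).take (pnew.length - 2)) =
      PySem.Str.join "."
        (pnew.take 2 ++ (pyListMax (pold.drop 2) (pnew.drop 2)).take (pnew.length - 2)) := by
  rw [take_two pnew h2, List.cons_append, List.cons_append, List.nil_append,
      str_join_cons, joinDots]
  simp [String.append_assoc]

-- ===== VERDICT (by name: the statement is the Claim_ definition above) =====
set_option maxHeartbeats 1000000 in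
theorem solve_version_spec : Claim_equal_solve_version := by
  intro o nv _hdom hpre
  obtain ⟨_, _, h2, hcase⟩ := hpre
  simp only [Spec_solve_version, solve_version, solve_version_alt]
  set pold := pvSplitDots (pv_parse o) with hpold
  set pnew := pvSplitDots (pv_parse nv) with hpnew
  have hcond : pnew.length ≤ pold.length ∨ pnew.length ≤ 2 ∨
      ∃ k, 2 ≤ k ∧ k < pold.length ∧ k < pnew.length ∧
        (∀ j, 2 ≤ j → j < k → pnew.getD j "" = pold.getD j "") ∧
        pold.getD k "" < pnew.getD k "" := by
    rcases hcase with h | h | ⟨k, hklen, hk2, hall, hklt⟩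
    · right; left; omega
    · left; exact h
    · right; right
      have hkn : k < pnew.length := by
        by_contra hk
        have hpn : pnew.getD k "" = "" := List.getD_eq_default _ _ (by omega)
        rw [hpn] at hklt
        exact absurd hklt (by simp [String.lt_iff_toList_lt])
      exact ⟨k, hk2, hklen, hkn, fun j hj1 hj2 => hall j hj2 hj1, hklt⟩
  rw [svLoop_eq_max pold pnew 2 "" h2 hcond, String.empty_append,
      show (2 : Int) = ((2 : Nat) : Int) from rfl,
      PySem.List.slice_from_natCast, PySem.List.slice_from_natCast,
      PySem.List.slice_to_natCast,
      show ((pnew.length : Int) - ((2 : Nat) : Int)) = (((pnew.length - 2 : Nat)) : Int) from by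
        omega,
      PySem.List.slice_to_natCast]
  exact congrArg _ (versions_eq pold pnew h2)
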